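/- GENERATED by farm/mkstatement.py from design/units.tsv (unit `start_decoder.C14`) and the assertions of Vorbis/Spec/StartDecoderA.lean — do not edit.
   THE STATEMENT of the proof unit `start_decoder.C14`: segment C14 of `start_decoder` (60 instructions; entries 0x1150b9;
   exits 0x113b22,0x114dfa; ranges 0x1150b9-0x1151ba)
   takes each of its entry assertions to one of its exit assertions (`Vorbis.Spec.StartDecoder.SegC14`), given the contracts of its callees.
   What the names mean: Vorbis/Spec/Basic.lean (the shared hypotheses), Vorbis/Spec/StartDecoderA.lean (the assertions). The theorem to prove:
   `theorem start_decoder_C14_ok : Vorbis.Spec.start_decoder_C14.Statement`. -/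
import Vorbis.Spec.Alloc
import Vorbis.Spec.Leaves
import Vorbis.Spec.StartDecoderA
namespace Vorbis.Spec.start_decoder_C14
open X86 X86.User Asan

/-- The statement of unit `start_decoder.C14`. -/
def Statement : Prop :=
  ∀ (Lay : Layout) (_hLay : Lay.hi = 0x1000000) (μ : Microarch) (_hμ : UserX.MicroOK μ) (u₀ : State)
    (_hcode : HasCodeNat Lay u₀ Vorbis.L.start_decoder.entry Vorbis.Code.code_start_decoder.nat Vorbis.L.start_decoder.size)
    (_h_setup_malloc : ∀ (others : List Obj) (frames : List (Nat × FrameLayout)) (A : Arena), Calls Lay μ Vorbis.WayInv (Vorbis.conv u₀) Vorbis.L.setup_malloc.entry (Vorbis.Spec.setup_malloc.spec others frames A))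
    (_h_asan_store8_noabort : Asan.SmallCheck Lay μ Vorbis.WayInv (Vorbis.CodeOK u₀) [.rax, .rcx, .rdx] 8 Vorbis.L.__asan_store8_noabort.entry)
    (_h_asan_load4_noabort : Asan.SmallCheck Lay μ Vorbis.WayInv (Vorbis.CodeOK u₀) [.rax, .rcx, .rdx] 4 Vorbis.L.__asan_load4_noabort.entry)
    (_h_setup_temp_free : ∀ (others : List Obj) (frames : List (Nat × FrameLayout)) (A : Arena) (m : Nat) (rest : List (Nat × Nat)), Calls Lay μ Vorbis.WayInv (Vorbis.conv u₀) Vorbis.L.setup_temp_free.entry (Vorbis.Spec.setup_temp_free.spec others frames A m rest))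
    (_h_error : ∀ (others : List Obj) (frames : List (Nat × FrameLayout)), Calls Lay μ Vorbis.WayInv (Vorbis.conv u₀) Vorbis.L.error.entry (Vorbis.Spec.error.spec others frames))
    (_h_asan_load2_noabort : Asan.SmallCheck Lay μ Vorbis.WayInv (Vorbis.CodeOK u₀) [.rax, .rcx, .rdx] 2 Vorbis.L.__asan_load2_noabort.entry)
    (_h_asan_store4_noabort : Asan.SmallCheck Lay μ Vorbis.WayInv (Vorbis.CodeOK u₀) [.rax, .rcx, .rdx] 4 Vorbis.L.__asan_store4_noabort.entry)
    (_h_asan_load1_noabort : Asan.SmallCheck Lay μ Vorbis.WayInv (Vorbis.CodeOK u₀) [.rax, .rdx] 1 Vorbis.L.__asan_load1_noabort.entry),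
    Vorbis.Spec.StartDecoder.SegC14 Lay μ u₀

end Vorbis.Spec.start_decoder_C14
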